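-- pv_equiv track=rewrite | github.com/garrisongohzenken/FYP | dashboard/dashboard.py | infer_target_encoded_cols
-- ===== SOURCE A (Python) =====
-- from typing import List, Optional, Tuple
--
-- def infer_target_encoded_cols(feat_names: List[str], high_card_cols: List[str]) -> List[str]:
--     """Infer which columns were target-encoded in training.
--
--     If a raw column name (e.g., 'company') exists in feature names and there are
--     no one-hot columns beginning with 'company_', assume target encoding.
--     """
--     te_cols = []
--     for c in high_card_cols:
--         has_plain = c in feat_names
--         has_ohe = any(fn.startswith(f"{c}_") for fn in feat_names)
--         if has_plain and not has_ohe: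
--             te_cols.append(c)
--     return te_cols
-- ===== SOURCE B (Python) =====
-- def infer_target_encoded_cols(feat_names, high_card_cols):
--     # Build, in one pass over feat_names, the set of plain names and the set of
--     # every underscore-terminated prefix of each feature name; then filter.
--     plain = set()
--     prefixes = set()
--     for fn in feat_names:
--         plain.add(fn)
--         for i, ch in enumerate(fn):
--             if ch == '_':
--                 prefixes.add(fn[:i])
--     return [c for c in high_card_cols if c in plain and c not in prefixes]
-- ===== Notes on version B (the rewrite author's own statement) =====
-- stated objective: faster
-- what changed: B builds, in one pass over feat_names, a set of plain names and a set of all underscore-terminated prefixes, then filters high_card_cols with two O(1) set lookups, replacing A's per-column membership scan and startswith scan over feat_names.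
import Mathlib
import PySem

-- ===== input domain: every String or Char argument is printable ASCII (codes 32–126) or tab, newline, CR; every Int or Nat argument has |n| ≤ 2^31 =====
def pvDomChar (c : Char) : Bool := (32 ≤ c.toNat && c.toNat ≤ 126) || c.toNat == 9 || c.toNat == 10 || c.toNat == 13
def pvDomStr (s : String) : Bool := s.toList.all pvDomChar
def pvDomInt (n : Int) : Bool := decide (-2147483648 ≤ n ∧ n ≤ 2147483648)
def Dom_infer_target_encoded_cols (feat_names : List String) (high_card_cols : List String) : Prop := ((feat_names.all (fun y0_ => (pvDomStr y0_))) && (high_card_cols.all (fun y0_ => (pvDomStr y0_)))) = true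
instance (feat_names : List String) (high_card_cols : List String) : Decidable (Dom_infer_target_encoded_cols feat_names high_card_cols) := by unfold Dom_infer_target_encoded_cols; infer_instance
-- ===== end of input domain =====

-- B builds a plain-name set and an underscore-prefix set in one pass over feat_names,
-- then filters high_card_cols with set lookups instead of A's repeated scans.


-- ===== PORT A =====
def infer_target_encoded_cols (feat_names : List String) (high_card_cols : List String) : List String :=
  high_card_cols.foldl (fun te_cols c =>
    let has_plain := feat_names.contains c
    let has_ohe := feat_names.any (fun fn => PySem.Str.startswith fn (c ++ "_"))
    if has_plain && !has_ohe then te_cols ++ [c] else te_cols) []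

-- ===== PORT B =====
-- one pass over feat_names: (plain names as a set, every underscore-terminated prefix as a set)
def pvIndex (feat_names : List String) : PySem.Set String × PySem.Set String :=
  feat_names.foldl (fun st fn =>
    (PySem.Set.add st.1 fn,
     (PySem.List.enumerate fn.toList).foldl (fun s p =>
        if p.2 == '_' then PySem.Set.add s (PySem.Str.slice fn none (some p.1)) else s) st.2))
    (PySem.Set.empty, PySem.Set.empty)

def infer_target_encoded_cols_alt (feat_names : List String) (high_card_cols : List String) : List String :=
  let idx := pvIndex feat_names
  high_card_cols.filter (fun c => PySem.Set.contains idx.1 c && !PySem.Set.contains idx.2 c)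

-- ===== PRECONDITION & SPEC =====
def Spec_infer_target_encoded_cols (feat_names : List String) (high_card_cols : List String) (out : List String) : Prop := out = infer_target_encoded_cols_alt feat_names high_card_cols
instance (feat_names : List String) (high_card_cols : List String) (out : List String) : Decidable (Spec_infer_target_encoded_cols feat_names high_card_cols out) := by unfold Spec_infer_target_encoded_cols; infer_instance

-- ===== CLAIM (what is proved, stated in full; the proofs are below) =====
def Claim_equal_infer_target_encoded_cols : Prop := ∀ (feat_names : List String) (high_card_cols : List String), Dom_infer_target_encoded_cols feat_names high_card_cols → Spec_infer_target_encoded_cols feat_names high_card_cols (infer_target_encoded_cols feat_names high_card_cols)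

-- ===== LEMMAS AND PROOFS =====

-- membership in a conditional-add fold over any list
theorem pv_mem_foldl_add_if {α : Type} (l : List α) (cond : α → Bool) (g : α → String)
    (s0 : PySem.Set String) (x : String) :
    x ∈ l.foldl (fun s p => if cond p then PySem.Set.add s (g p) else s) s0 ↔
      x ∈ s0 ∨ ∃ p ∈ l, cond p = true ∧ x = g p := by
  induction l generalizing s0 with
  | nil => simp
  | cons a t ih =>
    simp only [List.foldl_cons, ih]
    by_cases h : cond a = true <;>
      simp only [h, if_true, if_false, Bool.false_eq_true, PySem.Set.mem_add, List.mem_cons]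
    · constructor
      · rintro ((hs | hx) | ⟨p, hp, hcp, hx⟩)
        · exact Or.inl hs
        · exact Or.inr ⟨a, Or.inl rfl, h, hx⟩
        · exact Or.inr ⟨p, Or.inr hp, hcp, hx⟩
      · rintro (hs | ⟨p, (rfl | hp), hcp, hx⟩)
        · exact Or.inl (Or.inl hs)
        · exact Or.inl (Or.inr hx)
        · exact Or.inr ⟨p, hp, hcp, hx⟩
    · constructor
      · rintro (hs | ⟨p, hp, hcp, hx⟩)
        · exact Or.inl hs
        · exact Or.inr ⟨p, Or.inr hp, hcp, hx⟩
      · rintro (hs | ⟨p, (rfl | hp), hcp, hx⟩)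
        · exact Or.inl hs
        · exact absurd hcp h
        · exact Or.inr ⟨p, hp, hcp, hx⟩

-- the inner loop over one feature name adds exactly its underscore-terminated prefixes
theorem pv_mem_inner (fn : String) (s0 : PySem.Set String) (x : String) :
    x ∈ (PySem.List.enumerate fn.toList).foldl (fun s p =>
        if p.2 == '_' then PySem.Set.add s (PySem.Str.slice fn none (some p.1)) else s) s0 ↔
      x ∈ s0 ∨ ∃ k : Nat, fn.toList[k]? = some '_' ∧ x = PySem.Str.slice fn none (some (k : Int)) := by
  rw [pv_mem_foldl_add_if]
  constructor
  · rintro (h | ⟨p, hp, hc, hx⟩)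
    · exact Or.inl h
    · rcases (PySem.List.mem_enumerate_iff _ _ _).1 hp with ⟨k, hk, rfl⟩
      refine Or.inr ⟨k, ?_, ?_⟩
      · simp only [beq_iff_eq] at hc
        simp [List.getElem?_eq_getElem hk, hc]
      · simpa using hx
  · rintro (h | ⟨k, hk, hx⟩)
    · exact Or.inl h
    · have hlt : k < fn.toList.length := by
        by_contra hge
        push Not at hge
        rw [List.getElem?_eq_none hge] at hk
        cases hk
      refine Or.inr ⟨((0 : Int) + k, fn.toList[k]), ?_, ?_, ?_⟩
      · exact (PySem.List.mem_enumerate_iff _ _ _).2 ⟨k, hlt, rfl⟩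
      · have hg := List.getElem?_eq_getElem hlt
        rw [hg] at hk
        simp [Option.some_inj.1 hk]
      · simpa using hx

-- the built index characterised: plain names and underscore-terminated prefixes
theorem pv_mem_pvIndex (fns : List String) (st : PySem.Set String × PySem.Set String) (x : String) :
    (x ∈ (fns.foldl (fun st fn =>
      (PySem.Set.add st.1 fn,
       (PySem.List.enumerate fn.toList).foldl (fun s p =>
          if p.2 == '_' then PySem.Set.add s (PySem.Str.slice fn none (some p.1)) else s) st.2)) st).1 ↔
        x ∈ st.1 ∨ x ∈ fns) ∧
    (x ∈ (fns.foldl (fun st fn =>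
      (PySem.Set.add st.1 fn,
       (PySem.List.enumerate fn.toList).foldl (fun s p =>
          if p.2 == '_' then PySem.Set.add s (PySem.Str.slice fn none (some p.1)) else s) st.2)) st).2 ↔
        x ∈ st.2 ∨ ∃ fn ∈ fns, ∃ k : Nat, fn.toList[k]? = some '_' ∧
          x = PySem.Str.slice fn none (some (k : Int))) := by
  induction fns generalizing st with
  | nil => simp
  | cons a t ih =>
    simp only [List.foldl_cons]
    refine ⟨?_, ?_⟩
    · rw [(ih _).1]
      simp only [PySem.Set.mem_add, List.mem_cons]
      tauto
    · rw [(ih _).2]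
      simp only [pv_mem_inner, List.mem_cons]
      constructor
      · rintro ((h | ⟨k, hk, hx⟩) | ⟨fn, hfn, hex⟩)
        · exact Or.inl h
        · exact Or.inr ⟨a, Or.inl rfl, k, hk, hx⟩
        · exact Or.inr ⟨fn, Or.inr hfn, hex⟩
      · rintro (h | ⟨fn, (rfl | hfn), hex⟩)
        · exact Or.inl (Or.inl h)
        · exact Or.inl (Or.inr hex)
        · exact Or.inr ⟨fn, hfn, hex⟩

-- startswith(fn, c + "_") holds iff some underscore position k in fn has fn[:k] = c
theorem pv_startswith_iff (fn c : String) :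
    PySem.Str.startswith fn (c ++ "_") = true ↔
      ∃ k : Nat, fn.toList[k]? = some '_' ∧ PySem.Str.slice fn none (some (k : Int)) = c := by
  rw [PySem.Str.startswith_eq, PySem.Chars.startswith_iff]
  have htl : (c ++ "_").toList = c.toList ++ ['_'] := by simp
  rw [htl]
  constructor
  · rintro ⟨t, ht⟩
    have ht' : c.toList ++ ('_' :: t) = fn.toList := by simpa [List.append_assoc] using ht
    refine ⟨c.toList.length, ?_, ?_⟩
    · rw [← ht', List.getElem?_append_right (le_refl _)]
      simp
    · apply String.ext
      simp only [PySem.Str.toList_slice, PySem.Chars.slice_eq_listSlice,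
        PySem.List.slice_to_natCast]
      rw [← ht']
      exact List.take_left
  · rintro ⟨k, hk, hx⟩
    have hlt : k < fn.toList.length := by
      by_contra hge
      push Not at hge
      rw [List.getElem?_eq_none hge] at hk
      cases hk
    have hc : c.toList = fn.toList.take k := by
      rw [← hx]
      simp [PySem.Str.toList_slice, PySem.Chars.slice_eq_listSlice, PySem.List.slice_to_natCast]
    refine ⟨fn.toList.drop (k + 1), ?_⟩
    rw [hc]
    have hstep : fn.toList.take k ++ ['_'] = fn.toList.take (k + 1) := by
      rw [List.take_add_one, List.getElem?_eq_getElem hlt]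
      have hu : fn.toList[k] = '_' := by
        have hg := List.getElem?_eq_getElem hlt
        rw [hg] at hk
        exact Option.some_inj.1 hk
      simp [hu]
    rw [hstep, List.take_append_drop]

theorem pv_cond_eq (fns : List String) (c : String) :
    (fns.contains c && !fns.any (fun fn => PySem.Str.startswith fn (c ++ "_"))) =
    (PySem.Set.contains (pvIndex fns).1 c && !PySem.Set.contains (pvIndex fns).2 c) := by
  have h1 : PySem.Set.contains (pvIndex fns).1 c = fns.contains c := by
    apply Bool.eq_iff_iff.mpr
    rw [PySem.Set.contains_iff, List.contains_iff_mem]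
    unfold pvIndex
    rw [(pv_mem_pvIndex fns _ c).1]
    simp [PySem.Set.empty]
  have h2 : PySem.Set.contains (pvIndex fns).2 c =
      fns.any (fun fn => PySem.Str.startswith fn (c ++ "_")) := by
    apply Bool.eq_iff_iff.mpr
    rw [PySem.Set.contains_iff, List.any_eq_true]
    unfold pvIndex
    rw [(pv_mem_pvIndex fns _ c).2]
    simp only [PySem.Set.empty, List.not_mem_nil, false_or]
    constructor
    · rintro ⟨fn, hfn, k, hk, hx⟩
      exact ⟨fn, hfn, (pv_startswith_iff fn c).2 ⟨k, hk, hx.symm⟩⟩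
    · rintro ⟨fn, hfn, hs⟩
      rcases (pv_startswith_iff fn c).1 hs with ⟨k, hk, hx⟩
      exact ⟨fn, hfn, k, hk, hx.symm⟩
  rw [h1, h2]

-- ===== VERDICT (by name: the statement is the Claim_ definition above) =====
theorem infer_target_encoded_cols_spec : Claim_equal_infer_target_encoded_cols := by
  intro feat_names high_card_cols _
  unfold Spec_infer_target_encoded_cols infer_target_encoded_cols infer_target_encoded_cols_alt
  rw [PySem.List.foldl_append_if_eq_filter]
  simp only [List.nil_append]
  exact List.filter_congr (fun c _ => pv_cond_eq feat_names c)
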